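-- pv_equiv track=rewrite | github.com/Yahya-Ashraf-Mohamed/Reliable-Transport-Protocol | client.py | numberOfBytes
-- ===== SOURCE A (Python) =====
-- def numberOfBytes(data):
--     temp=0
--     for i in range(len(data)):
--         if i==len(data)-1:
--             temp=temp+len(data[i])
--         else:
--             temp+=1024
--     return temp
-- ===== SOURCE B (Python) =====
-- def numberOfBytes(data):
--     if not data:
--         return 0
--     return (len(data) - 1) * 1024 + len(data[-1])
-- ===== Notes on version B (the rewrite author's own statement) =====
-- stated objective: faster
-- what changed: replaces the loop over all chunks by the closed form (len(data)-1)*1024 + len(data[-1]) (0 for the empty list)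
import Mathlib
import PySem

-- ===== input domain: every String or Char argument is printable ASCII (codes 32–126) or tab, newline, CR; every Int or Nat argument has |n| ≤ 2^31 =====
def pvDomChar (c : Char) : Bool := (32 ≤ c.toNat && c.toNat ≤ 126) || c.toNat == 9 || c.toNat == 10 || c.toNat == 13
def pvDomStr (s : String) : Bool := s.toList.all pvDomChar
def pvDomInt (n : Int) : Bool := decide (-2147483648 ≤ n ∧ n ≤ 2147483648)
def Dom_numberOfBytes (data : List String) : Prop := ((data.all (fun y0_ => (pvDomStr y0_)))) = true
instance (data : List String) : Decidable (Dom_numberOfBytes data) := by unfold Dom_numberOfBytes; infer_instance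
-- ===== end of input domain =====

-- B replaces A's loop over all chunks by the closed form (len-1)*1024 + len(last) (0 if empty): O(1) instead of O(n).

-- ===== PORT A =====
def numberOfBytes (data : List String) : Int :=
  (PySem.List.pyRange 0 (data.length : Int) 1).foldl
    (fun temp i =>
      if i = (data.length : Int) - 1 then
        temp + PySem.Str.len (PySem.List.pyGetD data i "")
      else
        temp + 1024)
    0

-- ===== PORT B =====
def numberOfBytes_alt (data : List String) : Int :=
  match data.getLast? with
  | none => 0
  | some last => ((data.length : Int) - 1) * 1024 + PySem.Str.len last

-- ===== PRECONDITION & SPEC =====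
def Spec_numberOfBytes (data : List String) (out : Int) : Prop := out = numberOfBytes_alt data
instance (data : List String) (out : Int) : Decidable (Spec_numberOfBytes data out) := by unfold Spec_numberOfBytes; infer_instance

-- ===== CLAIM (what is proved, stated in full; the proofs are below) =====
def Claim_equal_numberOfBytes : Prop := ∀ (data : List String), Dom_numberOfBytes data → Spec_numberOfBytes data (numberOfBytes data)

-- ===== LEMMAS AND PROOFS =====

-- A's loop body adds 1024 for every index that is not the last one.
theorem pvFoldConst (m : Int) (f : Int → Int → Int)
    (hf : ∀ t i, i ≠ m → f t i = t + 1024) :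
    ∀ (l : List Int), (∀ i ∈ l, i ≠ m) → ∀ (t : Int),
      l.foldl f t = t + 1024 * l.length := by
  intro l
  induction l with
  | nil => intro _ t; simp
  | cons a l ih =>
    intro h t
    have ha : a ≠ m := h a (by simp)
    have hl : ∀ i ∈ l, i ≠ m := fun i hi => h i (by simp [hi])
    simp only [List.foldl_cons, hf t a ha, ih hl, List.length_cons]
    push_cast
    ring

theorem numberOfBytes_concat (l : List String) (x : String) :
    numberOfBytes (l ++ [x]) = ((l.length : Int)) * 1024 + PySem.Str.len x := by
  unfold numberOfBytes
  have hlen : ((l ++ [x]).length : Int) = (l.length : Int) + 1 := by simp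
  rw [hlen]
  have hsplit : PySem.List.pyRange 0 ((l.length : Int) + 1) 1
      = PySem.List.pyRange 0 (l.length : Int) 1 ++ [(l.length : Int)] := by
    simpa using PySem.List.pyRange_one_succ_right (a := 0) (b := (l.length : Int)) (by positivity)
  rw [hsplit, List.foldl_append]
  have hne : ∀ i ∈ PySem.List.pyRange 0 (l.length : Int) 1, i ≠ (l.length : Int) + 1 - 1 := by
    intro i hi
    have := (PySem.List.mem_pyRange_one).1 hi
    omega
  rw [pvFoldConst _ _ (fun t i hi => if_neg hi) _ hne]
  have hc : ((l.length : Nat) : Int) = (l.length : Int) + 1 - 1 := by ring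
  simp only [List.foldl_cons, List.foldl_nil, if_pos hc]
  have hget : PySem.List.pyGetD (l ++ [x]) ((l.length : Nat) : Int) "" = x := by
    rw [PySem.List.pyGetD_natCast]
    simp
  rw [hget]
  simp [PySem.List.length_pyRange_one]
  ring

-- ===== VERDICT (by name: the statement is the Claim_ definition above) =====
theorem numberOfBytes_spec : Claim_equal_numberOfBytes := by
  intro data _
  unfold Spec_numberOfBytes
  rcases List.eq_nil_or_concat data with rfl | ⟨l, x, rfl⟩

  · simp [numberOfBytes, numberOfBytes_alt, PySem.List.pyRange]
  · rw [List.concat_eq_append, numberOfBytes_concat]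
    unfold numberOfBytes_alt
    simp
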